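-- pv_equiv track=rewrite | github.com/pypi-data/pypi-mirror-99 | packages/vsg/vsg-3.0.0.tar.gz/vsg-3.0.0/vsg/tokens.py | combine_whitespace
-- ===== SOURCE A (Python) =====
-- def combine_whitespace(lChars):
--     lReturn = []
--     sSpace = ''
--     for sChar in lChars:
--         if sChar == ' ':
--             sSpace += sChar
--         else:
--             if sSpace != '':
--                 lReturn.append(sSpace)
--                 sSpace = ''
--             lReturn.append(sChar)
--
--     if sSpace != '':
--         lReturn.append(sSpace)
--
--     return lReturn
-- ===== SOURCE B (Python) =====
-- def combine_whitespace(lChars):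
--     out = []
--     i = 0
--     n = len(lChars)
--     while i < n:
--         j = i
--         if lChars[i] == ' ':
--             while j < n and lChars[j] == ' ':
--                 j += 1
--             out.append(''.join(lChars[i:j]))
--         else:
--             while j < n and lChars[j] != ' ':
--                 j += 1
--             out.extend(lChars[i:j])
--         i = j
--     return out
-- ===== Notes on version B (the rewrite author's own statement) =====
-- stated objective: alternative
-- what changed: B scans the list as maximal runs (a run-splitting two-index loop: join each space run into one token, copy each non-space run verbatim) instead of A's per-element state machine carrying a pending-spaces accumulator.
import Mathlib
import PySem

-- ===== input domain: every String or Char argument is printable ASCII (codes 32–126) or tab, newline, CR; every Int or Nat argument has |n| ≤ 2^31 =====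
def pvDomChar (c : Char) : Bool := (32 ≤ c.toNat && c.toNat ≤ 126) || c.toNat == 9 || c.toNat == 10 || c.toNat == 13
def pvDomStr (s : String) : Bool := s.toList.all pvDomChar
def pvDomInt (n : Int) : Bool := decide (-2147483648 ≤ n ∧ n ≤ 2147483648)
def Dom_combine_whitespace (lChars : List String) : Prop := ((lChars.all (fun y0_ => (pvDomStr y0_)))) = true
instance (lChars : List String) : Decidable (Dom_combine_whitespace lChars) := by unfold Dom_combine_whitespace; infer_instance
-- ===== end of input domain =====

-- B replaces A's per-element pending-spaces state machine by a run-splitting scan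
-- (maximal runs consumed whole: space runs joined into one token, non-space runs copied).
-- ===== PORT A =====
def combine_whitespace (lChars : List String) : List String :=
  let st := lChars.foldl (fun (acc : List String × String) sChar =>
    if sChar == " " then (acc.1, acc.2 ++ sChar)
    else ((if acc.2 ≠ "" then acc.1 ++ [acc.2] else acc.1) ++ [sChar], "")) ([], "")
  if st.2 ≠ "" then st.1 ++ [st.2] else st.1

-- ===== PORT B =====
-- run-splitting scan: consume a maximal run at each step (Source B's two-index loop)
def cwRuns (l : List String) : List String :=
  match l with
  | [] => []
  | c :: rest =>
    if c == " " then
      String.join ((c :: rest).takeWhile (fun x => x == " "))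
        :: cwRuns ((c :: rest).dropWhile (fun x => x == " "))
    else
      (c :: rest).takeWhile (fun x => x != " ")
        ++ cwRuns ((c :: rest).dropWhile (fun x => x != " "))
  termination_by l.length
  decreasing_by
    · simp only [List.dropWhile]
      simp only [show (c == " ") = true from by simp_all]
      exact Nat.lt_succ_of_le (List.length_dropWhile_le _ _)
    · simp only [List.dropWhile]
      simp only [show (c != " ") = true from by simp_all]
      exact Nat.lt_succ_of_le (List.length_dropWhile_le _ _)

def combine_whitespace_alt (lChars : List String) : List String := cwRuns lChars

-- ===== PRECONDITION & SPEC =====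
def Spec_combine_whitespace (lChars : List String) (out : List String) : Prop := out = combine_whitespace_alt lChars
instance (lChars : List String) (out : List String) : Decidable (Spec_combine_whitespace lChars out) := by unfold Spec_combine_whitespace; infer_instance

-- ===== CLAIM (what is proved, stated in full; the proofs are below) =====
def Claim_equal_combine_whitespace : Prop := ∀ (lChars : List String), Dom_combine_whitespace lChars → Spec_combine_whitespace lChars (combine_whitespace lChars)

-- ===== LEMMAS AND PROOFS =====

-- ===== VERDICT (by name: the statement is the Claim_ definition above) =====

def joinSp (n : Nat) : String := String.join (List.replicate n " ")

theorem joinSp_succ (n : Nat) : joinSp (n + 1) = joinSp n ++ " " := by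
  simp [joinSp, List.replicate_succ', String.join, List.foldl_append]

theorem joinSp_len (n : Nat) : (joinSp n).length = n := by
  induction n with
  | zero => simp [joinSp, String.join]
  | succ m ih =>
    rw [joinSp_succ]
    rw [String.length_append, ih]
    rfl

theorem joinSp_ne (n : Nat) : (joinSp (n+1) ≠ "") := by
  intro h
  have := joinSp_len (n+1)
  rw [h] at this
  simp at this

theorem cwRuns_run (t : List String) :
    cwRuns t = t.takeWhile (fun x => x != " ") ++ cwRuns (t.dropWhile (fun x => x != " ")) := by
  match t with
  | [] => simp [cwRuns]
  | d :: t' =>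
    by_cases h : (d == " ") = true
    · have hb : (d != " ") = false := by simp [bne, h]
      simp [hb]
    · rw [cwRuns]
      simp [h]

theorem cwRuns_cons_ne (c : String) (t : List String) (h : (c == " ") = false) :
    cwRuns (c :: t) = c :: cwRuns t := by
  rw [cwRuns, if_neg (by simp [h])]
  have hb : (c != " ") = true := by simp [bne, h]
  rw [List.takeWhile_cons, List.dropWhile_cons, hb]
  simp only [if_true, List.cons_append]
  rw [← cwRuns_run]

theorem rep_split (c : String) (t : List String) (h : (c == " ") = false) (k : Nat) :
    (List.replicate k " " ++ c :: t).takeWhile (fun x => x == " ") = List.replicate k " "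
    ∧ (List.replicate k " " ++ c :: t).dropWhile (fun x => x == " ") = c :: t := by
  induction k with
  | zero => simp [h]
  | succ m ih => simp [List.replicate_succ, ih]

theorem cwRuns_rep (c : String) (t : List String) (h : (c == " ") = false) (m : Nat) :
    cwRuns (List.replicate (m+1) " " ++ c :: t) = joinSp (m+1) :: c :: cwRuns t := by
  have hs := rep_split c t h (m+1)
  rw [show List.replicate (m+1) " " ++ c :: t
        = " " :: (List.replicate m " " ++ c :: t) from by simp [List.replicate_succ]]
  rw [cwRuns]
  simp only [show (" " == " ") = true from rfl, if_true]
  rw [show (" " :: (List.replicate m " " ++ c :: t)) = List.replicate (m+1) " " ++ c :: t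
        from by simp [List.replicate_succ]]
  rw [hs.1, hs.2, cwRuns_cons_ne c t h]
  rfl

theorem cwRuns_rep_only (m : Nat) :
    cwRuns (List.replicate (m+1) " ") = [joinSp (m+1)] := by
  rw [show List.replicate (m+1) " " = " " :: List.replicate m " " from by simp [List.replicate_succ]]
  rw [cwRuns]
  simp only [show (" " == " ") = true from rfl, if_true]
  have h1 : (" " :: List.replicate m " ").takeWhile (fun x => x == " ") = List.replicate (m+1) " " := by
    simp [List.takeWhile, List.replicate_succ]
  have h2 : (" " :: List.replicate m " ").dropWhile (fun x => x == " ") = [] := by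
    simp [List.dropWhile]
  rw [h1, h2]
  simp [cwRuns, joinSp]

theorem main_lemma (l : List String) : ∀ (acc : List String) (n : Nat),
    (let st := l.foldl (fun (acc : List String × String) sChar =>
      if sChar == " " then (acc.1, acc.2 ++ sChar)
      else ((if acc.2 ≠ "" then acc.1 ++ [acc.2] else acc.1) ++ [sChar], "")) (acc, joinSp n)
     if st.2 ≠ "" then st.1 ++ [st.2] else st.1)
    = acc ++ cwRuns (List.replicate n " " ++ l) := by
  induction l with
  | nil =>
    intro acc n
    match n with
    | 0 => simp [joinSp, String.join, cwRuns]
    | m+1 =>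
      simp only [List.foldl_nil, List.append_nil, cwRuns_rep_only]
      simp [joinSp_ne m]
  | cons c t ih =>
    intro acc n
    by_cases h : (c == " ") = true
    · have hc : c = " " := by simpa using h
      simp only [List.foldl_cons, hc, ← joinSp_succ]
      rw [show List.replicate n " " ++ " " :: t = List.replicate (n+1) " " ++ t from by
        simp [List.replicate_succ']]
      exact ih acc (n+1)
    · have h' : (c == " ") = false := by simpa using h
      simp only [List.foldl_cons, h', Bool.false_eq_true, if_false]
      match n with
      | 0 =>
        have := ih (acc ++ [c]) 0
        simp only [joinSp, List.replicate, String.join, List.foldl_nil, List.nil_append] at this ⊢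
        simp only [ne_eq, not_true_eq_false, if_false] at this ⊢
        rw [this, cwRuns_cons_ne c t h']
        simp
      | m+1 =>
        have hne := joinSp_ne m
        have hthis := ih (acc ++ [joinSp (m+1)] ++ [c]) 0
        rw [show joinSp 0 = "" from rfl] at hthis
        rw [show List.replicate 0 " " ++ t = t from rfl] at hthis
        simp only [ne_eq, hne, not_false_eq_true, if_true]
        rw [hthis, cwRuns_rep c t h' m]
        simp

theorem combine_whitespace_spec : Claim_equal_combine_whitespace := by
  intro l _
  unfold Spec_combine_whitespace combine_whitespace combine_whitespace_alt
  have := main_lemma l [] 0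
  simpa [joinSp] using this
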